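-- pv_equiv track=rewrite | github.com/lmb-embrapa/machado | machado/loaders/similarity.py | retrieve_id_from_description
-- ===== SOURCE A (Python) =====
-- from typing import Optional
--
-- def retrieve_id_from_description(description: str) -> Optional[str]:
--     """Retrieve ID from description."""
--     for item in description.split(' '):
--         try:
--             key, value = item.split('=')
--             if key == 'ID':
--                 return value
--         except ValueError:
--             pass
--     return None
-- ===== SOURCE B (Python) =====
-- from typing import Optional
--
-- def retrieve_id_from_description(description: str) -> Optional[str]:
--     """Retrieve ID from description."""
--     fields = {}
--     for item in description.split(' '):
--         try:
--             key, value = item.split('=')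
--         except ValueError:
--             continue
--         fields.setdefault(key, value)
--     return fields.get('ID')
-- ===== Notes on version B (the rewrite author's own statement) =====
-- stated objective: idiomatic
-- what changed: B parses all tokens once into a first-occurrence-wins dict of key=value fields and then looks up 'ID', instead of A's scan with early return on the matching token.
import Mathlib
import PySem

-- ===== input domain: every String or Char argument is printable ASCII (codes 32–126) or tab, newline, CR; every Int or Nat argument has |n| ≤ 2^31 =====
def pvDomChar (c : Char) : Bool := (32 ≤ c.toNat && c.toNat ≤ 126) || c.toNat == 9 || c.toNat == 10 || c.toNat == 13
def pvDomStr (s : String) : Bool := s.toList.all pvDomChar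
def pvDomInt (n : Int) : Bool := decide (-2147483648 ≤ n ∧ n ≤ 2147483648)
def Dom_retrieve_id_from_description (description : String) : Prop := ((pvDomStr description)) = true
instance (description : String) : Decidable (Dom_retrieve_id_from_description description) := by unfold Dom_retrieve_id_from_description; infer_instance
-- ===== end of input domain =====

-- B builds the whole key=value field dict (first occurrence wins) and then looks up 'ID';
-- A scans and returns early. Same results; B is the idiomatic build-an-index form.

-- ===== PORT A =====
-- the for-loop with early return
def retrieveIdGo : List String → Option String
  | [] => none
  | item :: rest =>
    match PySem.Str.split? item "=" with
    | some [key, value] => if key == "ID" then some value else retrieveIdGo rest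
    | _ => retrieveIdGo rest

def retrieve_id_from_description (description : String) : Option String :=
  retrieveIdGo ((PySem.Str.split? description " ").getD [])

-- ===== PORT B =====
-- fold building the fields dict with setdefault, then a single lookup
def retrieve_id_from_description_alt (description : String) : Option String :=
  let fields := ((PySem.Str.split? description " ").getD []).foldl
    (fun d item =>
      match PySem.Str.split? item "=" with
      | some [key, value] => d.setdefault key value
      | _ => d)
    PySem.Dict.empty
  fields.get? "ID"

-- ===== PRECONDITION & SPEC =====
def Spec_retrieve_id_from_description (description : String) (out : Option String) : Prop := out = retrieve_id_from_description_alt description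
instance (description : String) (out : Option String) : Decidable (Spec_retrieve_id_from_description description out) := by unfold Spec_retrieve_id_from_description; infer_instance

-- ===== CLAIM (what is proved, stated in full; the proofs are below) =====
def Claim_equal_retrieve_id_from_description : Prop := ∀ (description : String), Dom_retrieve_id_from_description description → Spec_retrieve_id_from_description description (retrieve_id_from_description description)

-- ===== LEMMAS AND PROOFS =====

-- loop invariant: folding B's step over l and then looking up "ID" gives the dict's
-- current binding if present, else A's early-return scan of l
theorem retrieveId_fold_invariant (l : List String) (d : PySem.Dict String String) :
    (l.foldl (fun d item =>
        match PySem.Str.split? item "=" with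
        | some [key, value] => d.setdefault key value
        | _ => d) d).get? "ID"
      = ((d.get? "ID").orElse (fun _ => retrieveIdGo l)) := by
  induction l generalizing d with
  | nil => cases h : d.get? "ID" <;> simp [retrieveIdGo, Option.orElse, h]
  | cons item rest ih =>
    simp only [List.foldl_cons, retrieveIdGo]
    cases hs : PySem.Str.split? item "=" with
    | none => simp [ih]
    | some parts =>
      match parts with
      | [] => exact ih d
      | [k] => exact ih d
      | k :: v :: w :: tl => exact ih d
      | [k, v] =>
        simp only []
        by_cases hk : k = "ID"
        · subst hk
          rw [ih]
          by_cases hc : d.contains "ID" = true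
          · rw [PySem.Dict.setdefault_of_contains _ _ hc]
            have hi : (d.get? "ID").isSome := by
              rw [← PySem.Dict.contains_eq_isSome_get?]; exact hc
            cases h : d.get? "ID" with
            | none => simp [h] at hi
            | some w => simp [Option.orElse]
          · have hc' : d.contains "ID" = false := by
              simp only [Bool.not_eq_true] at hc; exact hc
            have hn : d.get? "ID" = none := by
              cases h : d.get? "ID" with
              | none => rfl
              | some w =>
                have hco := PySem.Dict.contains_eq_isSome_get? d "ID"
                rw [h] at hco; simp [hc'] at hco
            rw [PySem.Dict.setdefault_of_not_contains _ _ hc',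
                PySem.Dict.get?_insert_self, hn]
            simp [Option.orElse]
        · have hne : ("ID" : String) ≠ k := fun h => hk h.symm
          rw [ih, PySem.Dict.get?_setdefault_of_ne _ _ hne]
          simp [beq_iff_eq, hk]

-- ===== VERDICT (by name: the statement is the Claim_ definition above) =====
theorem retrieve_id_from_description_spec : Claim_equal_retrieve_id_from_description := by
  intro description _
  unfold Spec_retrieve_id_from_description retrieve_id_from_description retrieve_id_from_description_alt
  rw [retrieveId_fold_invariant]
  simp [Option.orElse]
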